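-- pv_equiv track=rewrite | github.com/ghkd1330/RL-Reflexion | reflection/episode_logging_3d.py | _compact_actions
-- ===== SOURCE A (Python) =====
-- from typing import Dict, List, Optional
--
-- def _compact_actions(actions: List[int]) -> str:
--     """
--     Create a compact string representation of actions.
--
--     Args:
--         actions: List of action IDs
--
--     Returns:
--         compact_str: Run-length encoded string
--     """
--     if not actions:
--         return ""
--
--     action_names = {
--         0: "LookDown", 1: "LookUp", 2: "MoveAhead",
--         3: "Pickup", 4: "RotateLeft", 5: "RotateRight", 6: "Toggle"
--     }
--
--     # Run-length encode
--     result = []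
--     current_action = actions[0]
--     count = 1
--
--     for action in actions[1:]:
--         if action == current_action:
--             count += 1
--         else:
--             name = action_names.get(current_action, f"Action{current_action}")
--             result.append(f"{name}×{count}" if count > 1 else name)
--             current_action = action
--             count = 1
--
--     # Add last group
--     name = action_names.get(current_action, f"Action{current_action}")
--     result.append(f"{name}×{count}" if count > 1 else name)
--
--     return ", ".join(result)
-- ===== SOURCE B (Python) =====
-- def _compact_actions(actions):
--     action_names = {
--         0: "LookDown", 1: "LookUp", 2: "MoveAhead",
--         3: "Pickup", 4: "RotateLeft", 5: "RotateRight", 6: "Toggle"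
--     }
--     parts = []
--     i = 0
--     n = len(actions)
--     while i < n:
--         j = i
--         while j < n and actions[j] == actions[i]:
--             j += 1
--         count = j - i
--         name = action_names.get(actions[i], f"Action{actions[i]}")
--         parts.append(f"{name}×{count}" if count > 1 else name)
--         i = j
--     return ", ".join(parts)
-- ===== Notes on version B (the rewrite author's own statement) =====
-- stated objective: alternative
-- what changed: B replaces A's accumulator-state single pass (current_action/count with a trailing flush after the loop) by an index-based run splitter: an outer loop that, for each run start, scans forward to the run's end and emits the segment immediately, so no leftover-state flush is needed and the empty case falls out for free.
import Mathlib
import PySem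

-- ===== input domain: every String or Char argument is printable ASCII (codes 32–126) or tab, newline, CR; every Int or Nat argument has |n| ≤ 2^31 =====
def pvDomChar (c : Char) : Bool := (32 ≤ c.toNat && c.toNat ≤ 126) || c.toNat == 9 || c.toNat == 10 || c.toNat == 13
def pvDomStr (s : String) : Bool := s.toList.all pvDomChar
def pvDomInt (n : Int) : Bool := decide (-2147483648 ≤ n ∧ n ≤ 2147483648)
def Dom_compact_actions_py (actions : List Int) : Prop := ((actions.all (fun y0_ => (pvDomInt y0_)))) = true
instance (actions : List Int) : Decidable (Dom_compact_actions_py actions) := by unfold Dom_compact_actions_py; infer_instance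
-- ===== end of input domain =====

-- B replaces A's accumulator single pass (current/count + trailing flush) by an index-free run splitter
-- that scans each maximal run and emits its segment immediately (objective: alternative; same cost).


-- ===== PORT A =====
-- the action_names dict (identical literal in both Pythons)
def pvActionNames : PySem.Dict Int String :=
  PySem.Dict.ofList [((0:Int), "LookDown"), (1, "LookUp"), (2, "MoveAhead"),
   (3, "Pickup"), (4, "RotateLeft"), (5, "RotateRight"), (6, "Toggle")]

-- shared segment formatting: action_names.get(v, f"Action{v}") and f"{name}×{c}" if c > 1 else name
def pvSeg (v : Int) (c : Int) : String :=
  let name := PySem.Dict.getD pvActionNames v ("Action" ++ PySem.Int.toStr v)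
  if c > 1 then name ++ "×" ++ PySem.Int.toStr c else name

def compact_actions_py (actions : List Int) : String :=
  match actions with
  | [] => ""
  | a0 :: rest =>
    let st := rest.foldl (fun (s : List String × Int × Int) action =>
      if action == s.2.1 then (s.1, s.2.1, s.2.2 + 1)
      else (s.1 ++ [pvSeg s.2.1 s.2.2], action, 1)) ([], a0, 1)
    PySem.Str.join ", " (st.1 ++ [pvSeg st.2.1 st.2.2])

-- ===== PORT B =====
-- the inner while loop scans the current run (takeWhile); the outer loop resumes at its end (dropWhile)
def pvRuns : List Int → List (Int × Int)
  | [] => []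
  | a :: rest =>
      (a, (rest.takeWhile (fun x => x == a)).length + 1) ::
        pvRuns (rest.dropWhile (fun x => x == a))
termination_by l => l.length
decreasing_by simpa using Nat.lt_succ_of_le (List.length_dropWhile_le _ _)

def compact_actions_py_alt (actions : List Int) : String :=
  PySem.Str.join ", " ((pvRuns actions).map (fun p => pvSeg p.1 p.2))

-- ===== PRECONDITION & SPEC =====
def Spec_compact_actions_py (actions : List Int) (out : String) : Prop := out = compact_actions_py_alt actions
instance (actions : List Int) (out : String) : Decidable (Spec_compact_actions_py actions out) := by unfold Spec_compact_actions_py; infer_instance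

-- ===== CLAIM (what is proved, stated in full; the proofs are below) =====
def Claim_equal_compact_actions_py : Prop := ∀ (actions : List Int), Dom_compact_actions_py actions → Spec_compact_actions_py actions (compact_actions_py actions)

-- ===== LEMMAS AND PROOFS =====
-- Loop invariant for A's fold: flushing the fold state yields acc ++ segments of the runs,
-- where the first run of `rest` headed by a0 already carries `cnt` occurrences.
lemma pv_fold_runs (rest : List Int) : ∀ (a0 cnt : Int) (acc : List String),
    (rest.foldl (fun (s : List String × Int × Int) action =>
        if action == s.2.1 then (s.1, s.2.1, s.2.2 + 1)
        else (s.1 ++ [pvSeg s.2.1 s.2.2], action, 1)) (acc, a0, cnt)).1 ++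
      [pvSeg (rest.foldl (fun (s : List String × Int × Int) action =>
        if action == s.2.1 then (s.1, s.2.1, s.2.2 + 1)
        else (s.1 ++ [pvSeg s.2.1 s.2.2], action, 1)) (acc, a0, cnt)).2.1
        (rest.foldl (fun (s : List String × Int × Int) action =>
        if action == s.2.1 then (s.1, s.2.1, s.2.2 + 1)
        else (s.1 ++ [pvSeg s.2.1 s.2.2], action, 1)) (acc, a0, cnt)).2.2]
    = acc ++ ((a0, cnt + ((rest.takeWhile (fun x => x == a0)).length : Int)) ::
        pvRuns (rest.dropWhile (fun x => x == a0))).map (fun p => pvSeg p.1 p.2) := by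
  induction rest with
  | nil => intro a0 cnt acc; simp [pvRuns]
  | cons b t ih =>
    intro a0 cnt acc
    by_cases h : b = a0
    · subst h
      simp only [List.foldl_cons, List.takeWhile_cons, List.dropWhile_cons,
        beq_self_eq_true, if_true]
      rw [ih b (cnt + 1) acc]
      congr 3
      simp only [Prod.mk.injEq, List.length_cons, true_and]
      push_cast
      omega
    · have hb : (b == a0) = false := by simp [h]
      simp only [List.foldl_cons, List.takeWhile_cons, List.dropWhile_cons, hb,
        Bool.false_eq_true, if_false]
      rw [ih b 1 (acc ++ [pvSeg a0 cnt]), pvRuns]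
      simp only [List.map_cons, List.append_assoc, List.cons_append, List.nil_append,
        List.length_nil, Int.natCast_zero, add_zero]
      congr 3
      rw [Int.add_comm]

theorem compact_actions_py_spec : Claim_equal_compact_actions_py := by
  intro actions _
  unfold Spec_compact_actions_py compact_actions_py compact_actions_py_alt
  cases actions with
  | nil => simp [pvRuns, PySem.Str.join]
  | cons a0 rest =>
    simp only []
    rw [pv_fold_runs rest a0 1 [], pvRuns]
    simp only [List.nil_append, List.map_cons]
    congr 3
    omega
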